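-- pv_equiv track=rewrite | github.com/EraCat/hse_cbab2025_hw | src/algo/hw7.py | mark_and_jump_2
-- ===== SOURCE A (Python) =====
-- def mark_and_jump_2(n, x, y, marks, unmarks):
--     marks_masks = [0] * (1 << n)
--     unmarks_masks = [0] * (1 << n)
--
--     for s in marks:
--         mask = 0
--         for e in s:
--             mask |= (1 << (e - 1))
--         marks_masks[mask] = 1
--
--     for s in unmarks:
--         mask = 0
--         for e in s:
--             mask |= (1 << (e - 1))
--         unmarks_masks[mask] = 1
--
--     marks_subs_masks = marks_masks[:]
--     unmarks_subs_masks = unmarks_masks[:]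
--
--     for bit in range(n):
--         for mask in range(1 << n):
--             if mask & (1 << bit) == 0:
--                 marks_subs_masks[mask] |= marks_subs_masks[mask | (1 << bit)]
--                 unmarks_subs_masks[mask] |= unmarks_subs_masks[mask | (1 << bit)]
--
--     count = 0
--     for mask in range(1 << n):
--         if marks_subs_masks[mask] == 1 and unmarks_subs_masks[mask] != 1:
--             count += 1
--
--     return count
-- ===== SOURCE B (Python) =====
-- def mark_and_jump_2(n, x, y, marks, unmarks):
--     def mask_of(s):
--         m = 0
--         for e in s:
--             m |= 1 << (e - 1)
--         return m
--
--     mark_masks = [mask_of(s) for s in marks]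
--     unmark_masks = [mask_of(s) for s in unmarks]
--
--     count = 0
--     for mask in range(1 << n):
--         if any(mask & mm == mask for mm in mark_masks) and \
--            not any(mask & um == mask for um in unmark_masks):
--             count += 1
--     return count
-- ===== Notes on version B (the rewrite author's own statement) =====
-- stated objective: simpler
-- what changed: Replaces the sum-over-supersets bit-DP (two 2^n tables sweept once per bit) by a direct per-mask superset test against the lists of original marked/unmarked masks.
import Mathlib
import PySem

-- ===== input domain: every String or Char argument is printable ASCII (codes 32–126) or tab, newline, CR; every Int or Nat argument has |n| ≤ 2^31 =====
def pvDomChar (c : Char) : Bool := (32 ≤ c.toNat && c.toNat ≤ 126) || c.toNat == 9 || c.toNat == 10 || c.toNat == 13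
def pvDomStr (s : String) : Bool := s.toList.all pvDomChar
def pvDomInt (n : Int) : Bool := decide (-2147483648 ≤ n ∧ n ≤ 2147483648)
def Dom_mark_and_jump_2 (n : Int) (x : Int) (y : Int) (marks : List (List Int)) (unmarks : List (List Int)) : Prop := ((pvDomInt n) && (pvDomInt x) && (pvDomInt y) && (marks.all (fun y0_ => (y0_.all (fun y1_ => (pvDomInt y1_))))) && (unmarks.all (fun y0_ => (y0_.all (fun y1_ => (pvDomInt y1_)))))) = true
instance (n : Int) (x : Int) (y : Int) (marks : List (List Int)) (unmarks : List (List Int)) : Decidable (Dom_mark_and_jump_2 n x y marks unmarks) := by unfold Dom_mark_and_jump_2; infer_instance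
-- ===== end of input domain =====

-- B replaces A's sum-over-supersets bit-DP by a direct per-mask superset test against the original
-- marked/unmarked masks (objective: simpler); same return value on all inputs admitted by Pre_.

-- ===== PORT A =====
-- inner loop 'mask |= 1 << (e - 1)' of both Pythons (identical text in A and B)
def pvMaskOf (s : List Int) : Nat :=
  s.foldl (fun m e => m ||| (1 <<< (e - 1).toNat)) 0

-- 'for s in l: table[maskOf s] = 1' over a fresh [0]*N table (List.set is a no-op out of range;
-- Python would raise IndexError there, such inputs are excluded by Pre_)
def pvMarkTable (N : Nat) (l : List (List Int)) : List Nat :=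
  l.foldl (fun a s => a.set (pvMaskOf s) 1) (List.replicate N 0)

def mark_and_jump_2 (n : Int) (x : Int) (y : Int) (marks : List (List Int)) (unmarks : List (List Int)) : Int :=
  let N := 1 <<< n.toNat
  let marks_masks := pvMarkTable N marks
  let unmarks_masks := pvMarkTable N unmarks
  -- 'for bit in range(n): for mask in range(1 << n): if mask & (1 << bit) == 0: …' updating both tables
  let p := (List.range n.toNat).foldl
    (fun (p : List Nat × List Nat) bit =>
      (List.range N).foldl
        (fun (q : List Nat × List Nat) mask =>
          if mask &&& (1 <<< bit) = 0 then
            (q.1.set mask (q.1.getD mask 0 ||| q.1.getD (mask ||| (1 <<< bit)) 0),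
             q.2.set mask (q.2.getD mask 0 ||| q.2.getD (mask ||| (1 <<< bit)) 0))
          else q) p)
    (marks_masks, unmarks_masks)
  (List.range N).foldl
    (fun c mask => if p.1.getD mask 0 = 1 ∧ p.2.getD mask 0 ≠ 1 then c + 1 else c) (0 : Int)

-- ===== PORT B =====
def mark_and_jump_2_alt (n : Int) (x : Int) (y : Int) (marks : List (List Int)) (unmarks : List (List Int)) : Int :=
  let mark_masks := marks.map pvMaskOf
  let unmark_masks := unmarks.map pvMaskOf
  (List.range (1 <<< n.toNat)).foldl
    (fun c mask =>
      if (mark_masks.any fun mm => mask &&& mm == mask) &&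
         !(unmark_masks.any fun um => mask &&& um == mask)
      then c + 1 else c) (0 : Int)

-- ===== PRECONDITION & SPEC =====
-- Pre_ excludes exactly the inputs where the Python A raises: n < 0 ('1 << n' raises ValueError)
-- and set elements outside 1..n ('1 << (e-1)' raises ValueError for e ≤ 0; the table write raises
-- IndexError for e > n).
def Pre_mark_and_jump_2 (n : Int) (x : Int) (y : Int) (marks : List (List Int)) (unmarks : List (List Int)) : Prop :=
  0 ≤ n ∧ (∀ s ∈ marks, ∀ e ∈ s, 1 ≤ e ∧ e ≤ n) ∧ (∀ s ∈ unmarks, ∀ e ∈ s, 1 ≤ e ∧ e ≤ n)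
instance (n : Int) (x : Int) (y : Int) (marks : List (List Int)) (unmarks : List (List Int)) : Decidable (Pre_mark_and_jump_2 n x y marks unmarks) := by unfold Pre_mark_and_jump_2; infer_instance

def pvWitness_mark_and_jump_2 : Int × Int × Int × List (List Int) × List (List Int) :=
  (2, 0, 0, [[1], [1, 2]], [[2]])

def Spec_mark_and_jump_2 (n : Int) (x : Int) (y : Int) (marks : List (List Int)) (unmarks : List (List Int)) (out : Int) : Prop := out = mark_and_jump_2_alt n x y marks unmarks
instance (n : Int) (x : Int) (y : Int) (marks : List (List Int)) (unmarks : List (List Int)) (out : Int) : Decidable (Spec_mark_and_jump_2 n x y marks unmarks out) := by unfold Spec_mark_and_jump_2; infer_instance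

-- ===== CLAIM (what is proved, stated in full; the proofs are below) =====
def Claim_equal_mark_and_jump_2 : Prop := ∀ (n : Int) (x : Int) (y : Int) (marks : List (List Int)) (unmarks : List (List Int)), Dom_mark_and_jump_2 n x y marks unmarks → Pre_mark_and_jump_2 n x y marks unmarks → Spec_mark_and_jump_2 n x y marks unmarks (mark_and_jump_2 n x y marks unmarks)

-- ===== LEMMAS AND PROOFS =====

-- getD/set bookkeeping
theorem pv_getD_set_self (a : List Nat) (m v : Nat) :
    (a.set m v).getD m 0 = if m < a.length then v else a.getD m 0 := by
  by_cases h : m < a.length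
  · simp [List.getD_eq_getElem?_getD, List.getElem?_set_self h, h]
  · simp [List.getD_eq_getElem?_getD, List.set_eq_of_length_le (by omega : a.length ≤ m), h]

theorem pv_getD_set_ne (a : List Nat) {i m : Nat} (v : Nat) (h : m ≠ i) :
    (a.set m v).getD i 0 = a.getD i 0 := by
  simp [List.getD_eq_getElem?_getD, List.getElem?_set_ne h]

-- bit facts
theorem pv_land_lor_self (i B : Nat) : (i ||| B) &&& B = B := by
  apply Nat.eq_of_testBit_eq
  intro j
  simp only [Nat.testBit_land, Nat.testBit_lor]
  cases i.testBit j <;> cases B.testBit j <;> rfl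

theorem pv_subset_iff (i s : Nat) :
    i &&& s = i ↔ ∀ j, i.testBit j = true → s.testBit j = true := by
  constructor
  · intro h j hj
    have h' := congrArg (fun t => t.testBit j) h
    simp only [Nat.testBit_land, hj, Bool.true_and] at h'
    exact h'
  · intro h
    apply Nat.eq_of_testBit_eq
    intro j
    simp only [Nat.testBit_land]
    cases hij : i.testBit j
    · rfl
    · simp [h j hij]

theorem pv_shiftRight_eq_iff (s i k : Nat) :
    s >>> k = i >>> k ↔ ∀ j, k ≤ j → s.testBit j = i.testBit j := by
  constructor
  · intro h j hj
    have h' := congrArg (fun t => t.testBit (j - k)) h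
    simpa [Nat.testBit_shiftRight, Nat.add_sub_cancel' hj] using h'
  · intro h
    apply Nat.eq_of_testBit_eq
    intro j
    simp only [Nat.testBit_shiftRight]
    exact h (k + j) (Nat.le_add_right _ _)

theorem pv_shiftRight_eq_of_lt {s i n : Nat} (hs : s < 2 ^ n) (hi : i < 2 ^ n) :
    s >>> n = i >>> n := by
  simp [Nat.shiftRight_eq_div_pow, Nat.div_eq_of_lt hs, Nat.div_eq_of_lt hi]

-- 0/1-valued tables
def pvIs01 (a : List Nat) : Prop := ∀ i, a.getD i 0 = 0 ∨ a.getD i 0 = 1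

theorem pv_lor01 {x y : Nat} (hx : x = 0 ∨ x = 1) (hy : y = 0 ∨ y = 1) :
    (x ||| y = 0 ∨ x ||| y = 1) ∧ (x ||| y = 1 ↔ x = 1 ∨ y = 1) := by
  rcases hx with hx | hx <;> rcases hy with hy | hy <;> subst hx <;> subst hy <;> simp

-- the SOS inner pass, single table
def pvStep (B : Nat) (a : List Nat) (m : Nat) : List Nat :=
  if m &&& B = 0 then a.set m (a.getD m 0 ||| a.getD (m ||| B) 0) else a

def pvPass (N B : Nat) (a : List Nat) : List Nat := (List.range N).foldl (pvStep B) a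

def pvSos (N : Nat) (a : List Nat) (k : Nat) : List Nat :=
  (List.range k).foldl (fun a b => pvPass N (1 <<< b) a) a

theorem pv_length_pvStep (B : Nat) (a : List Nat) (m : Nat) : (pvStep B a m).length = a.length := by
  unfold pvStep; split <;> simp

theorem pv_length_foldl_pvStep (B : Nat) (l : List Nat) (a : List Nat) :
    (l.foldl (pvStep B) a).length = a.length := by
  induction l generalizing a with
  | nil => rfl
  | cons m t ih => simp [List.foldl_cons, ih, pv_length_pvStep]

theorem pv_length_pvSos (N : Nat) (a : List Nat) (k : Nat) : (pvSos N a k).length = a.length := by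
  induction k with
  | zero => rfl
  | succ k ih =>
    unfold pvSos at ih ⊢
    rw [List.range_succ, List.foldl_append, List.foldl_cons, List.foldl_nil]
    unfold pvPass
    rw [pv_length_foldl_pvStep]
    exact ih

theorem pv_foldl_pvStep_getD (B : Nat) (hB : B ≠ 0) :
    ∀ (l : List Nat) (a : List Nat), l.Nodup → ∀ i,
      (l.foldl (pvStep B) a).getD i 0 =
        if i ∈ l ∧ i &&& B = 0 ∧ i < a.length
        then a.getD i 0 ||| a.getD (i ||| B) 0 else a.getD i 0 := by
  intro l
  induction l with
  | nil => intro a _ i; simp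
  | cons m t ih =>
    intro a hnd i
    have hndt := (List.nodup_cons.mp hnd).2
    have hmem := (List.nodup_cons.mp hnd).1
    rw [List.foldl_cons, ih (pvStep B a m) hndt i]
    have hlen : (pvStep B a m).length = a.length := pv_length_pvStep B a m
    by_cases hmB : m &&& B = 0
    · have hstep : pvStep B a m = a.set m (a.getD m 0 ||| a.getD (m ||| B) 0) := by
        simp [pvStep, hmB]
      have hread : ∀ j : Nat, (pvStep B a m).getD (j ||| B) 0 = a.getD (j ||| B) 0 := by
        intro j
        rw [hstep]
        apply pv_getD_set_ne
        intro hc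
        have h1 : (j ||| B) &&& B = B := pv_land_lor_self j B
        rw [← hc, hmB] at h1
        exact hB h1.symm
      by_cases hiB : i &&& B = 0
      · by_cases hil : i < a.length
        · by_cases hit : i ∈ t
          · have him : i ≠ m := fun h => hmem (h ▸ hit)
            rw [if_pos ⟨hit, hiB, by rw [hlen]; exact hil⟩,
                if_pos ⟨List.mem_cons_of_mem _ hit, hiB, hil⟩,
                hread, hstep, pv_getD_set_ne _ _ (fun h => him h.symm)]
          · by_cases him : i = m
            · subst him
              rw [if_neg (fun h => hit h.1),
                  if_pos ⟨List.mem_cons_self .., hiB, hil⟩,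
                  hstep, pv_getD_set_self, if_pos hil]
            · rw [if_neg (fun h => hit h.1),
                  if_neg (by rintro ⟨h1, -, -⟩
                             rcases List.mem_cons.mp h1 with h' | h'
                             exacts [him h', hit h']),
                  hstep, pv_getD_set_ne _ _ (fun h => him h.symm)]
        · rw [if_neg (fun h => hil (by rw [← hlen]; exact h.2.2)),
              if_neg (fun h => hil h.2.2)]
          rw [hstep]
          by_cases him : i = m
          · subst him
            rw [List.set_eq_of_length_le (by omega : a.length ≤ i)]
          · exact pv_getD_set_ne _ _ (fun h => him h.symm)
      · rw [if_neg (fun h => hiB h.2.1), if_neg (fun h => hiB h.2.1)]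
        rw [hstep]
        apply pv_getD_set_ne
        intro hc
        rw [hc] at hmB
        exact hiB hmB
    · have hstep : pvStep B a m = a := by simp [pvStep, hmB]
      rw [hstep]
      by_cases h : i ∈ t ∧ i &&& B = 0 ∧ i < a.length
      · rw [if_pos h, if_pos ⟨List.mem_cons_of_mem _ h.1, h.2⟩]
      · rw [if_neg h]
        apply (if_neg _).symm
        rintro ⟨hmemc, hiB, hil⟩
        rcases List.mem_cons.mp hmemc with h' | h'
        · subst h'; exact hmB hiB
        · exact h ⟨h', hiB, hil⟩

theorem pv_pvPass_getD (N B : Nat) (hB : B ≠ 0) (a : List Nat) (hlen : a.length = N) (i : Nat) :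
    (pvPass N B a).getD i 0 =
      if i < N ∧ i &&& B = 0
      then a.getD i 0 ||| a.getD (i ||| B) 0 else a.getD i 0 := by
  unfold pvPass
  rw [pv_foldl_pvStep_getD B hB (List.range N) a List.nodup_range i]
  simp [List.mem_range, hlen, and_assoc, and_comm]

theorem pv_is01_foldl_pvStep (B : Nat) (l : List Nat) (a : List Nat) (h : pvIs01 a) :
    pvIs01 (l.foldl (pvStep B) a) := by
  induction l generalizing a with
  | nil => exact h
  | cons m t ih =>
    apply ih
    intro i
    unfold pvStep
    split
    · by_cases him : m = i
      · subst him
        rw [pv_getD_set_self]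
        split
        · exact (pv_lor01 (h m) (h (m ||| B))).1
        · exact h m
      · rw [pv_getD_set_ne _ _ him]; exact h i
    · exact h i

theorem pv_is01_pvSos (N : Nat) (a : List Nat) (k : Nat) (h : pvIs01 a) : pvIs01 (pvSos N a k) := by
  unfold pvSos
  induction k with
  | zero => exact h
  | succ k ih =>
    rw [List.range_succ, List.foldl_append]
    exact pv_is01_foldl_pvStep _ _ _ ih

-- the mark table
theorem pv_foldl_set_one (l : List (List Int)) :
    ∀ (a : List Nat) (i : Nat),
      (l.foldl (fun a s => a.set (pvMaskOf s) 1) a).getD i 0 =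
        if (∃ s ∈ l, pvMaskOf s = i) ∧ i < a.length then 1 else a.getD i 0 := by
  induction l with
  | nil => intro a i; simp
  | cons s0 t ih =>
    intro a i
    rw [List.foldl_cons, ih]
    have hlen : (a.set (pvMaskOf s0) 1).length = a.length := List.length_set
    by_cases hil : i < a.length
    · by_cases hex : ∃ s ∈ t, pvMaskOf s = i
      · rw [if_pos ⟨hex, by rw [hlen]; exact hil⟩,
            if_pos ⟨by rcases hex with ⟨s, hs, hm⟩; exact ⟨s, List.mem_cons_of_mem _ hs, hm⟩, hil⟩]
      · by_cases him : pvMaskOf s0 = i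
        · rw [if_neg (fun h => hex h.1),
              if_pos ⟨⟨s0, List.mem_cons_self .., him⟩, hil⟩]
          subst him
          rw [pv_getD_set_self, if_pos hil]
        · rw [if_neg (fun h => hex h.1)]
          rw [pv_getD_set_ne _ _ him]
          apply (if_neg _).symm
          rintro ⟨⟨s, hs, hm⟩, -⟩
          rcases List.mem_cons.mp hs with h' | h'
          · subst h'; exact him hm
          · exact hex ⟨s, h', hm⟩
    · rw [if_neg (fun h => hil (by rw [← hlen]; exact h.2)), if_neg (fun h => hil h.2)]
      by_cases him : pvMaskOf s0 = i
      · subst him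
        rw [List.set_eq_of_length_le (by omega : a.length ≤ pvMaskOf s0)]
      · exact pv_getD_set_ne _ _ him

theorem pv_markTable_getD (N : Nat) (l : List (List Int)) (i : Nat) :
    (pvMarkTable N l).getD i 0 = if (∃ s ∈ l, pvMaskOf s = i) ∧ i < N then 1 else 0 := by
  unfold pvMarkTable
  rw [pv_foldl_set_one]
  simp only [List.length_replicate]
  split
  · rfl
  · simp [List.getD_eq_getElem?_getD, List.getElem?_replicate]
    split <;> rfl

theorem pv_markTable_length (N : Nat) (l : List (List Int)) : (pvMarkTable N l).length = N := by
  unfold pvMarkTable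
  have : ∀ (l : List (List Int)) (a : List Nat),
      (l.foldl (fun a s => a.set (pvMaskOf s) 1) a).length = a.length := by
    intro l
    induction l with
    | nil => intro a; rfl
    | cons s t ih => intro a; simp [List.foldl_cons, ih]
  rw [this]; simp

theorem pv_markTable_is01 (N : Nat) (l : List (List Int)) : pvIs01 (pvMarkTable N l) := by
  intro i
  rw [pv_markTable_getD]
  split
  · exact Or.inr rfl
  · exact Or.inl rfl

-- mask bound under Pre_
theorem pv_maskOf_lt (n : Int) (s : List Int) (h : ∀ e ∈ s, 1 ≤ e ∧ e ≤ n) :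
    pvMaskOf s < 2 ^ n.toNat := by
  unfold pvMaskOf
  have aux : ∀ (t : List Int) (acc : Nat), (∀ e ∈ t, 1 ≤ e ∧ e ≤ n) → acc < 2 ^ n.toNat →
      t.foldl (fun m e => m ||| (1 <<< (e - 1).toNat)) acc < 2 ^ n.toNat := by
    intro t
    induction t with
    | nil => intro acc _ hacc; exact hacc
    | cons e t ih =>
      intro acc ht hacc
      rw [List.foldl_cons]
      apply ih _ (fun e he => ht e (List.mem_cons_of_mem _ he))
      apply Nat.or_lt_two_pow hacc
      rw [Nat.one_shiftLeft]
      apply Nat.pow_lt_pow_right (by omega)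
      have he := ht e (List.mem_cons_self ..)
      omega
  exact aux s 0 h (Nat.two_pow_pos _)

-- the SOS characterisation
theorem pv_sos_getD (n : Nat) (a : List Nat) (hlen : a.length = 2 ^ n) (h01 : pvIs01 a) :
    ∀ k, k ≤ n → ∀ i, i < 2 ^ n →
      ((pvSos (2 ^ n) a k).getD i 0 = 1 ↔
        ∃ s, s < 2 ^ n ∧ i &&& s = i ∧ s >>> k = i >>> k ∧ a.getD s 0 = 1) := by
  intro k
  induction k with
  | zero =>
    intro _ i hi
    unfold pvSos
    simp only [List.range_zero, List.foldl_nil, Nat.shiftRight_zero]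
    constructor
    · intro h
      exact ⟨i, hi, Nat.and_self i, rfl, h⟩
    · rintro ⟨s, _, _, hsk, hs⟩
      subst hsk
      exact hs
  | succ k ih =>
    intro hk1 i hi
    have hk : k < n := hk1
    have hBne : (1 : Nat) <<< k ≠ 0 := by
      rw [Nat.one_shiftLeft]; exact (Nat.two_pow_pos k).ne'
    have hsos1 : pvSos (2 ^ n) a (k + 1) = pvPass (2 ^ n) (1 <<< k) (pvSos (2 ^ n) a k) := by
      unfold pvSos
      rw [List.range_succ, List.foldl_append]
      rfl
    have hlen' : (pvSos (2 ^ n) a k).length = 2 ^ n := by rw [pv_length_pvSos, hlen]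
    have h01' : pvIs01 (pvSos (2 ^ n) a k) := pv_is01_pvSos _ _ _ h01
    rw [hsos1, pv_pvPass_getD _ _ hBne _ hlen' i]
    have h2k : (1 : Nat) <<< k = 2 ^ k := Nat.one_shiftLeft k
    by_cases hbit : i &&& (1 <<< k) = 0
    · -- bit k of i is clear: or of i and i ||| 2^k
      have hbitk : i.testBit k = false := by
        have := congrArg (fun t => t.testBit k) hbit
        simpa [Nat.testBit_land, h2k, Nat.testBit_two_pow_self] using this
      have hi' : i ||| (1 <<< k) < 2 ^ n := by
        apply Nat.or_lt_two_pow hi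
        rw [h2k]
        exact Nat.pow_lt_pow_right (by omega) hk
      rw [if_pos ⟨hi, hbit⟩]
      rw [(pv_lor01 (h01' i) (h01' (i ||| (1 <<< k)))).2]
      rw [ih (by omega) i hi, ih (by omega) _ hi']
      constructor
      · rintro (⟨s, hs, hsub, hsh, hval⟩ | ⟨s, hs, hsub, hsh, hval⟩)
        · refine ⟨s, hs, hsub, ?_, hval⟩
          rw [pv_shiftRight_eq_iff] at hsh ⊢
          intro j hj
          exact hsh j (by omega)
        · refine ⟨s, hs, ?_, ?_, hval⟩
          · rw [pv_subset_iff] at hsub ⊢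
            intro j hj
            exact hsub j (by simp [Nat.testBit_lor, hj])
          · rw [pv_shiftRight_eq_iff] at hsh ⊢
            intro j hj
            rw [hsh j (by omega)]
            simp only [Nat.testBit_lor, h2k, Nat.testBit_two_pow]
            have : ¬ (k = j) := by omega
            simp [this]
      · rintro ⟨s, hs, hsub, hsh, hval⟩
        have hsub' := (pv_subset_iff i s).mp hsub
        rw [pv_shiftRight_eq_iff] at hsh
        by_cases hsk : s.testBit k
        · right
          refine ⟨s, hs, ?_, ?_, hval⟩
          · rw [pv_subset_iff]
            intro j hj
            simp only [Nat.testBit_lor, h2k, Nat.testBit_two_pow] at hj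
            rcases Bool.or_eq_true_iff.mp hj with hj | hj
            · exact hsub' j hj
            · have : k = j := by simpa using hj
              subst this
              exact hsk
          · rw [pv_shiftRight_eq_iff]
            intro j hj
            simp only [Nat.testBit_lor, h2k, Nat.testBit_two_pow]
            by_cases hkj : k = j
            · subst hkj
              simp [hsk]
            · have : k + 1 ≤ j := by omega
              rw [hsh j this]
              simp [hkj]
        · left
          refine ⟨s, hs, hsub, ?_, hval⟩
          rw [pv_shiftRight_eq_iff]
          intro j hj
          by_cases hkj : k = j
          · subst hkj
            simp [hsk, hbitk]
          · exact hsh j (by omega)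
    · -- bit k of i is set
      have hbitk : i.testBit k = true := by
        by_contra hc
        apply hbit
        apply Nat.eq_of_testBit_eq
        intro j
        simp only [Nat.testBit_land, h2k, Nat.testBit_two_pow, Nat.zero_testBit]
        by_cases hkj : k = j
        · subst hkj; simp [Bool.not_eq_true] at hc; simp [hc]
        · simp [hkj]
      rw [if_neg (fun h => hbit h.2)]
      rw [ih (by omega) i hi]
      constructor
      · rintro ⟨s, hs, hsub, hsh, hval⟩
        refine ⟨s, hs, hsub, ?_, hval⟩
        rw [pv_shiftRight_eq_iff] at hsh ⊢
        intro j hj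
        exact hsh j (by omega)
      · rintro ⟨s, hs, hsub, hsh, hval⟩
        refine ⟨s, hs, hsub, ?_, hval⟩
        rw [pv_subset_iff] at hsub
        rw [pv_shiftRight_eq_iff] at hsh ⊢
        intro j hj
        by_cases hkj : k = j
        · subst hkj
          rw [hsub k hbitk, hbitk]
        · exact hsh j (by omega)

-- splitting the paired fold of port A into two single-table folds
theorem pv_foldl_pair {α : Type} (f g : List Nat → α → List Nat) :
    ∀ (l : List α) (a b : List Nat),
      l.foldl (fun p x => (f p.1 x, g p.2 x)) (a, b) = (l.foldl f a, l.foldl g b) := by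
  intro l
  induction l with
  | nil => intro a b; rfl
  | cons x t ih => intro a b; simp [List.foldl_cons, ih]

theorem pv_inner_pair (N B : Nat) (p : List Nat × List Nat) :
    (List.range N).foldl
        (fun (q : List Nat × List Nat) mask =>
          if mask &&& B = 0 then
            (q.1.set mask (q.1.getD mask 0 ||| q.1.getD (mask ||| B) 0),
             q.2.set mask (q.2.getD mask 0 ||| q.2.getD (mask ||| B) 0))
          else q) p = (pvPass N B p.1, pvPass N B p.2) := by
  have hfun : (fun (q : List Nat × List Nat) mask =>
          if mask &&& B = 0 then
            (q.1.set mask (q.1.getD mask 0 ||| q.1.getD (mask ||| B) 0),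
             q.2.set mask (q.2.getD mask 0 ||| q.2.getD (mask ||| B) 0))
          else q) = fun (q : List Nat × List Nat) mask => (pvStep B q.1 mask, pvStep B q.2 mask) := by
    funext q mask
    unfold pvStep
    split <;> rfl
  rw [hfun]
  rw [show p = (p.1, p.2) from rfl]
  exact pv_foldl_pair _ _ _ _ _

theorem pv_outer_pair (N : Nat) (k : Nat) (a b : List Nat) :
    (List.range k).foldl
      (fun (p : List Nat × List Nat) bit =>
        (List.range N).foldl
          (fun (q : List Nat × List Nat) mask =>
            if mask &&& (1 <<< bit) = 0 then
              (q.1.set mask (q.1.getD mask 0 ||| q.1.getD (mask ||| (1 <<< bit)) 0),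
               q.2.set mask (q.2.getD mask 0 ||| q.2.getD (mask ||| (1 <<< bit)) 0))
            else q) p) (a, b) = (pvSos N a k, pvSos N b k) := by
  have hfun : (fun (p : List Nat × List Nat) bit =>
        (List.range N).foldl
          (fun (q : List Nat × List Nat) mask =>
            if mask &&& (1 <<< bit) = 0 then
              (q.1.set mask (q.1.getD mask 0 ||| q.1.getD (mask ||| (1 <<< bit)) 0),
               q.2.set mask (q.2.getD mask 0 ||| q.2.getD (mask ||| (1 <<< bit)) 0))
            else q) p)
      = fun (p : List Nat × List Nat) bit => (pvPass N (1 <<< bit) p.1, pvPass N (1 <<< bit) p.2) := by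
    funext p bit
    exact pv_inner_pair N (1 <<< bit) p
  rw [hfun]
  unfold pvSos
  exact pv_foldl_pair (fun a bit => pvPass N (1 <<< bit) a)
    (fun a bit => pvPass N (1 <<< bit) a) (List.range k) a b

-- counting folds agree when the conditions agree on the members
theorem pv_foldl_count_congr (p : Nat → Prop) [DecidablePred p] (q : Nat → Bool) :
    ∀ (l : List Nat) (c : Int), (∀ m ∈ l, p m ↔ q m = true) →
      l.foldl (fun c m => if p m then c + 1 else c) c =
      l.foldl (fun c m => if q m then c + 1 else c) c := by
  intro l
  induction l with
  | nil => intro c _; rfl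
  | cons m t ih =>
    intro c h
    simp only [List.foldl_cons]
    have hm := h m (List.mem_cons_self ..)
    by_cases hp : p m
    · rw [if_pos hp, if_pos (hm.mp hp)]
      exact ih _ (fun m hm => h m (List.mem_cons_of_mem _ hm))
    · rw [if_neg hp, if_neg (fun hb => hp (hm.mpr hb))]
      exact ih _ (fun m hm => h m (List.mem_cons_of_mem _ hm))

-- the per-mask condition of port A equals the corresponding 'any' test of port B
theorem pv_cond_iff (n : Int) (hn : 0 ≤ n) (l : List (List Int))
    (hb : ∀ s ∈ l, ∀ e ∈ s, 1 ≤ e ∧ e ≤ n) (mask : Nat) (hmask : mask < 2 ^ n.toNat) :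
    (pvSos (2 ^ n.toNat) (pvMarkTable (2 ^ n.toNat) l) n.toNat).getD mask 0 = 1 ↔
      ((l.map pvMaskOf).any fun mm => mask &&& mm == mask) = true := by
  rw [pv_sos_getD n.toNat _ (pv_markTable_length _ _) (pv_markTable_is01 _ _) n.toNat
    (le_refl _) mask hmask]
  simp only [List.any_eq_true, List.mem_map]
  constructor
  · rintro ⟨s, hs, hsub, -, hval⟩
    rw [pv_markTable_getD] at hval
    by_cases hc : (∃ t ∈ l, pvMaskOf t = s) ∧ s < 2 ^ n.toNat
    · rcases hc.1 with ⟨t, ht, hts⟩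
      exact ⟨pvMaskOf t, ⟨t, ht, rfl⟩, by rw [hts]; exact beq_iff_eq.mpr hsub⟩
    · rw [if_neg hc] at hval
      exact absurd hval (by omega)
  · rintro ⟨mm, ⟨t, ht, hmm⟩, hbeq⟩
    subst hmm
    have hlt : pvMaskOf t < 2 ^ n.toNat := pv_maskOf_lt n t (hb t ht)
    refine ⟨pvMaskOf t, hlt, beq_iff_eq.mp hbeq, pv_shiftRight_eq_of_lt hlt hmask, ?_⟩
    rw [pv_markTable_getD]
    exact if_pos ⟨⟨t, ht, rfl⟩, hlt⟩

-- ===== VERDICT (by name: the statement is the Claim_ definition above) =====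
theorem mark_and_jump_2_spec : Claim_equal_mark_and_jump_2 := by
  intro n x y marks unmarks _ hpre
  obtain ⟨hn, hm, hu⟩ := hpre
  unfold Spec_mark_and_jump_2 mark_and_jump_2 mark_and_jump_2_alt
  simp only []
  rw [Nat.one_shiftLeft]
  rw [pv_outer_pair]
  apply pv_foldl_count_congr
  intro mask hmask
  rw [List.mem_range] at hmask
  have hmiff := pv_cond_iff n hn marks hm mask hmask
  have huiff := pv_cond_iff n hn unmarks hu mask hmask
  have hu01 : pvIs01 (pvSos (2 ^ n.toNat) (pvMarkTable (2 ^ n.toNat) unmarks) n.toNat) :=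
    pv_is01_pvSos _ _ _ (pv_markTable_is01 _ _)
  constructor
  · rintro ⟨h1, h2⟩
    rw [Bool.and_eq_true, Bool.not_eq_true']
    refine ⟨hmiff.mp h1, ?_⟩
    rw [← Bool.not_eq_true]
    intro hb
    exact h2 (huiff.mpr hb)
  · intro hb
    rw [Bool.and_eq_true, Bool.not_eq_true'] at hb
    refine ⟨hmiff.mpr hb.1, ?_⟩
    intro h1
    have := huiff.mp h1
    rw [hb.2] at this
    exact Bool.false_ne_true this
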